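-- pv_equiv track=rewrite | github.com/wesleylam/advent_of_code_2024 | D6.py | moveUntilBlocked
-- ===== SOURCE A (Python) =====
-- def moveUntilBlocked(startLoc, direction, blockedI, blockedJ, endI, endJ):
--
--     assert startLoc[0] not in blockedI or blockedI[startLoc[0]] == sorted(blockedI[startLoc[0]])
--     assert startLoc[1] not in blockedJ or blockedJ[startLoc[1]] == sorted(blockedJ[startLoc[1]])
--
--     if direction % 4 == 0:
--         if startLoc[1] not in blockedJ:
--             return 0 , startLoc[1]
--
--         for k, i in enumerate(blockedJ[startLoc[1]][::-1]):
--             if i < startLoc[0]: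
--                 return i+1, startLoc[1]
--
--         return 0, startLoc[1]
--
--     if direction % 4 == 1:
--         if startLoc[0] not in blockedI:
--             return startLoc[0], endJ
--
--         for k, j in enumerate(blockedI[startLoc[0]]):
--             if j > startLoc[1]:
--                 return startLoc[0], j-1
--
--         return startLoc[0], endJ
--
--     if direction % 4 == 2:
--         if startLoc[1] not in blockedJ:
--             return endI, startLoc[1]
--
--         for k, i in enumerate(blockedJ[startLoc[1]]):
--             if i > startLoc[0]:
--                 return i-1, startLoc[1]
--
--         return endI, startLoc[1]
--
--     if direction % 4 == 3:
--         if startLoc[0] not in blockedI: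
--             return startLoc[0], 0
--
--         for k, j in enumerate(blockedI[startLoc[0]][::-1]):
--             if j < startLoc[1]:
--                 return startLoc[0], j+1
--
--         return startLoc[0], 0
--
--     return
-- ===== SOURCE B (Python) =====
-- def _bisect_left(a, x):
--     lo, hi = 0, len(a)
--     while lo < hi:
--         mid = (lo + hi) // 2
--         if a[mid] < x:
--             lo = mid + 1
--         else:
--             hi = mid
--     return lo
--
--
-- def _bisect_right(a, x):
--     lo, hi = 0, len(a)
--     while lo < hi:
--         mid = (lo + hi) // 2
--         if a[mid] <= x:
--             lo = mid + 1
--         else: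
--             hi = mid
--     return lo
--
--
-- def moveUntilBlocked(startLoc, direction, blockedI, blockedJ, endI, endJ):
--     i0, j0 = startLoc[0], startLoc[1]
--     d = direction % 4
--
--     if d == 0:
--         a = blockedJ.get(j0)
--         if a is None:
--             return 0, j0
--         k = _bisect_left(a, i0)
--         return (a[k - 1] + 1, j0) if k else (0, j0)
--
--     if d == 1:
--         a = blockedI.get(i0)
--         if a is None:
--             return i0, endJ
--         k = _bisect_right(a, j0)
--         return (i0, a[k] - 1) if k < len(a) else (i0, endJ)
--
--     if d == 2:
--         a = blockedJ.get(j0)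
--         if a is None:
--             return endI, j0
--         k = _bisect_right(a, i0)
--         return (a[k] - 1, j0) if k < len(a) else (endI, j0)
--
--     a = blockedI.get(i0)
--     if a is None:
--         return i0, 0
--     k = _bisect_left(a, j0)
--     return (i0, a[k - 1] + 1) if k else (i0, 0)
-- ===== Notes on version B (the rewrite author's own statement) =====
-- stated objective: alternative
-- what changed: A scans the sorted blocked list linearly (forwards or reversed) for the first coordinate past the start; B finds that coordinate with a hand-written bisect_left/bisect_right binary search on the sorted list.
import Mathlib
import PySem

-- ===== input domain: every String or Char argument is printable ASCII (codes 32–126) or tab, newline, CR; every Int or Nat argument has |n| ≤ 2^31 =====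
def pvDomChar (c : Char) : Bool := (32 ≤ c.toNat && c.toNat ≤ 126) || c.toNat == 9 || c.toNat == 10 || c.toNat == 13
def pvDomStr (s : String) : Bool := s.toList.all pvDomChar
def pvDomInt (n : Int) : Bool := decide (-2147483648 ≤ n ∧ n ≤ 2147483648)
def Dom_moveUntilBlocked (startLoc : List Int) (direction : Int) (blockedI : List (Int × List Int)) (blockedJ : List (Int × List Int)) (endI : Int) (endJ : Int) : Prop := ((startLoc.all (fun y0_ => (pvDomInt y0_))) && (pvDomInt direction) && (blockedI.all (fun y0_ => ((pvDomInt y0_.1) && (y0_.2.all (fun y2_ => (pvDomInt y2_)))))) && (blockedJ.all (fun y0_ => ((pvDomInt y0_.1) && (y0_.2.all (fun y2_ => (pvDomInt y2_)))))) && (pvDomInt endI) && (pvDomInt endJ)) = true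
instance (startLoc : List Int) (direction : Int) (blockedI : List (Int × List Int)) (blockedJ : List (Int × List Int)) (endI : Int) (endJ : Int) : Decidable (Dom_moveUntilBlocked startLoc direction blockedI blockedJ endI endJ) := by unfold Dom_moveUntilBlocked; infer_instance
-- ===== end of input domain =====

-- B replaces A's linear scans over the sorted blocked lists by a bisect_left/bisect_right binary search
-- (an alternative algorithm; not measurably faster here). Dict arguments are association lists (lookup = first match).

-- ===== PORT A =====

-- first element `i < x` of the list, scanning left to right (A's `for … : if i < x: return …` loop)
def pvScanLt : List Int → Int → Option Int
  | [], _ => none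
  | i :: rest, x => if i < x then some i else pvScanLt rest x

-- first element `j > x` of the list, scanning left to right
def pvScanGt : List Int → Int → Option Int
  | [], _ => none
  | j :: rest, x => if j > x then some j else pvScanGt rest x

def moveUntilBlocked (startLoc : List Int) (direction : Int) (blockedI : List (Int × List Int)) (blockedJ : List (Int × List Int)) (endI : Int) (endJ : Int) : List Int :=
  match PySem.List.pyGet? startLoc 0, PySem.List.pyGet? startLoc 1 with
  | some s0, some s1 =>
    -- the two asserts: a failing assert raises AssertionError (excluded by Pre_)
    let okI : Bool := match blockedI.lookup s0 with
      | none => true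
      | some l => l == PySem.List.sorted l (fun y => y) false
    let okJ : Bool := match blockedJ.lookup s1 with
      | none => true
      | some l => l == PySem.List.sorted l (fun y => y) false
    if okI && okJ then
      let d := PySem.Int.mod direction 4
      if d = 0 then
        match blockedJ.lookup s1 with
        | none => [0, s1]
        | some l =>
          -- l[::-1] is l.reverse (PySem.List.slice?_none_none_neg_one)
          match pvScanLt l.reverse s0 with
          | some i => [i + 1, s1]
          | none => [0, s1]
      else if d = 1 then
        match blockedI.lookup s0 with
        | none => [s0, endJ]
        | some l =>
          match pvScanGt l s1 with
          | some j => [s0, j - 1]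
          | none => [s0, endJ]
      else if d = 2 then
        match blockedJ.lookup s1 with
        | none => [endI, s1]
        | some l =>
          match pvScanGt l s0 with
          | some i => [i - 1, s1]
          | none => [endI, s1]
      else if d = 3 then
        match blockedI.lookup s0 with
        | none => [s0, 0]
        | some l =>
          match pvScanLt l.reverse s1 with
          | some j => [s0, j + 1]
          | none => [s0, 0]
      else [] -- unreachable `return None` (direction % 4 ∈ {0,1,2,3})
    else [] -- AssertionError
  | _, _ => [] -- IndexError on startLoc (excluded by Pre_)

-- ===== PORT B =====
-- Source B's hand-written _bisect_left/_bisect_right are exactly Python's bisect_left/bisect_right loops,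
-- ported as the PySem primitives PySem.List.bisectLeft / bisectRight (same lo/hi halving loop).
def moveUntilBlocked_alt (startLoc : List Int) (direction : Int) (blockedI : List (Int × List Int)) (blockedJ : List (Int × List Int)) (endI : Int) (endJ : Int) : List Int :=
  match PySem.List.pyGet? startLoc 0 with
  | none => []
  | some i0 =>
  match PySem.List.pyGet? startLoc 1 with
  | none => []
  | some j0 =>
    let d := PySem.Int.mod direction 4
    if d = 0 then
      match blockedJ.lookup j0 with
      | none => [0, j0]
      | some a =>
        let k := PySem.List.bisectLeft a i0
        if k ≠ 0 then [a.getD (k - 1) 0 + 1, j0] else [0, j0]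
    else if d = 1 then
      match blockedI.lookup i0 with
      | none => [i0, endJ]
      | some a =>
        let k := PySem.List.bisectRight a j0
        if k < a.length then [i0, a.getD k 0 - 1] else [i0, endJ]
    else if d = 2 then
      match blockedJ.lookup j0 with
      | none => [endI, j0]
      | some a =>
        let k := PySem.List.bisectRight a i0
        if k < a.length then [a.getD k 0 - 1, j0] else [endI, j0]
    else
      match blockedI.lookup i0 with
      | none => [i0, 0]
      | some a =>
        let k := PySem.List.bisectLeft a j0
        if k ≠ 0 then [i0, a.getD (k - 1) 0 + 1] else [i0, 0]

-- ===== PRECONDITION & SPEC =====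
-- Pre_ excludes exactly the inputs on which Python A raises: startLoc shorter than 2 (IndexError)
-- and inputs whose blocked list at startLoc's key is not sorted (AssertionError).
def Pre_moveUntilBlocked (startLoc : List Int) (direction : Int) (blockedI : List (Int × List Int)) (blockedJ : List (Int × List Int)) (endI : Int) (endJ : Int) : Prop :=
  2 ≤ startLoc.length ∧
  ((blockedI.lookup (startLoc.getD 0 0)).getD []).Pairwise (· ≤ ·) ∧
  ((blockedJ.lookup (startLoc.getD 1 0)).getD []).Pairwise (· ≤ ·)
instance (startLoc : List Int) (direction : Int) (blockedI : List (Int × List Int)) (blockedJ : List (Int × List Int)) (endI : Int) (endJ : Int) : Decidable (Pre_moveUntilBlocked startLoc direction blockedI blockedJ endI endJ) := by unfold Pre_moveUntilBlocked; infer_instance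

def pvWitness_moveUntilBlocked : List Int × Int × (List (Int × List Int)) × (List (Int × List Int)) × Int × Int := ([2, 3], 2, [(2, [1, 5])], [(3, [0, 4])], 9, 9)

def Spec_moveUntilBlocked (startLoc : List Int) (direction : Int) (blockedI : List (Int × List Int)) (blockedJ : List (Int × List Int)) (endI : Int) (endJ : Int) (out : List Int) : Prop := out = moveUntilBlocked_alt startLoc direction blockedI blockedJ endI endJ
instance (startLoc : List Int) (direction : Int) (blockedI : List (Int × List Int)) (blockedJ : List (Int × List Int)) (endI : Int) (endJ : Int) (out : List Int) : Decidable (Spec_moveUntilBlocked startLoc direction blockedI blockedJ endI endJ out) := by unfold Spec_moveUntilBlocked; infer_instance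

-- ===== CLAIM (what is proved, stated in full; the proofs are below) =====
def Claim_equal_moveUntilBlocked : Prop := ∀ (startLoc : List Int) (direction : Int) (blockedI : List (Int × List Int)) (blockedJ : List (Int × List Int)) (endI : Int) (endJ : Int), Dom_moveUntilBlocked startLoc direction blockedI blockedJ endI endJ → Pre_moveUntilBlocked startLoc direction blockedI blockedJ endI endJ → Spec_moveUntilBlocked startLoc direction blockedI blockedJ endI endJ (moveUntilBlocked startLoc direction blockedI blockedJ endI endJ)

-- ===== LEMMAS AND PROOFS =====

lemma pvScanLt_eq_find? (l : List Int) (x : Int) : pvScanLt l x = l.find? (fun i => decide (i < x)) := by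
  induction l with
  | nil => rfl
  | cons a t ih =>
    rw [pvScanLt, List.find?, ih]
    by_cases h : a < x <;> simp [h]

lemma pvScanGt_eq_find? (l : List Int) (x : Int) : pvScanGt l x = l.find? (fun j => decide (j > x)) := by
  induction l with
  | nil => rfl
  | cons a t ih =>
    rw [pvScanGt, List.find?, ih]
    by_cases h : a > x <;> simp [h]

-- a find? characterised by its first hit index
lemma pvFind?_first {α : Type} (p : α → Bool) (l : List α) (k : Nat) (hk : k ≤ l.length)
    (hlo : ∀ j (hj : j < l.length), j < k → p l[j] = false)
    (hhi : ∀ (h : k < l.length), p l[k] = true) :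
    l.find? p = if h : k < l.length then some l[k] else none := by
  induction l generalizing k with
  | nil => simp
  | cons a t ih =>
    cases k with
    | zero =>
      have := hhi (by simp)
      simp at this
      simp [List.find?, this]
    | succ k' =>
      have ha := hlo 0 (by simp) (by omega)
      simp at ha
      rw [List.find?, ha]
      have := ih k' (by simpa using hk)
        (fun j hj hjk => by simpa using hlo (j + 1) (by simpa using hj) (by omega))
        (fun h => by simpa using hhi (by simpa using h))
      rw [this]
      simp

-- A's reverse linear scan for the last element < x is B's bisect_left lookup
lemma pvRevLt (a : List Int) (x : Int) (hs : a.Pairwise (· ≤ ·)) :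
    pvScanLt a.reverse x =
      if PySem.List.bisectLeft a x ≠ 0 then some (a.getD (PySem.List.bisectLeft a x - 1) 0) else none := by
  obtain ⟨hk, hlo, hhi⟩ := PySem.List.bisectLeft_spec a x hs
  set k := PySem.List.bisectLeft a x with hkdef
  rw [pvScanLt_eq_find?]
  rw [pvFind?_first (fun i => decide (i < x)) a.reverse (a.length - k)
    (by simp)
    (by
      intro j hj hjk
      simp only [List.length_reverse] at hj hjk
      rw [List.getElem_reverse]
      simp only [decide_eq_false_iff_not, not_lt]
      exact hhi (a.length - 1 - j) (by omega) (by omega))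
    (by
      intro h
      simp only [List.length_reverse] at h
      rw [List.getElem_reverse]
      simp only [decide_eq_true_eq]
      have hgoal := hlo (k - 1) (by omega) (by omega)
      have hidx : a.length - 1 - (a.length - k) = k - 1 := by omega
      rw [getElem_congr rfl hidx (by omega)]
      exact hgoal)]
  by_cases h0 : k = 0
  · simp [h0]
  · have hlt : a.length - k < a.reverse.length := by simp; omega
    have hk1 : k - 1 < a.length := by omega
    have hrv : a.reverse[a.length - k]'hlt = a[k-1]'hk1 := by
      rw [List.getElem_reverse]
      exact getElem_congr rfl (by omega) (by omega)
    rw [dif_pos hlt, hrv, if_pos h0, List.getD_eq_getElem a 0 hk1]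

-- A's forward linear scan for the first element > x is B's bisect_right lookup
lemma pvFwdGt (a : List Int) (x : Int) (hs : a.Pairwise (· ≤ ·)) :
    pvScanGt a x =
      if PySem.List.bisectRight a x < a.length then some (a.getD (PySem.List.bisectRight a x) 0) else none := by
  obtain ⟨hk, hlo, hhi⟩ := PySem.List.bisectRight_spec a x hs
  set k := PySem.List.bisectRight a x with hkdef
  rw [pvScanGt_eq_find?]
  rw [pvFind?_first (fun j => decide (j > x)) a k hk
    (by
      intro j hj hjk
      simp only [decide_eq_false_iff_not, not_lt]
      exact hlo _ hj hjk)
    (by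
      intro h
      simp only [decide_eq_true_eq]
      exact hhi _ h (le_refl _))]
  by_cases h : k < a.length
  · rw [dif_pos h, if_pos h, List.getD_eq_getElem a 0 h]
  · rw [dif_neg h, if_neg h]

set_option maxRecDepth 8192 in
theorem moveUntilBlocked_spec : Claim_equal_moveUntilBlocked := by
  intro startLoc direction bI bJ eI eJ _hDom hPre
  obtain ⟨hlen, hsI, hsJ⟩ := hPre
  rcases startLoc with _ | ⟨s0, _ | ⟨s1, r⟩⟩
  · simp at hlen
  · simp at hlen
  have hnn : (0:Int) ≤ (r.length : Int) + 1 := by positivity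
  have h0 : PySem.List.pyGet? (s0 :: s1 :: r) (0 : Int) = some s0 := by
    simp [PySem.List.pyGet?, PySem.List.pyIdx?, hnn]
  have h1 : PySem.List.pyGet? (s0 :: s1 :: r) (1 : Int) = some s1 := by
    simp [PySem.List.pyGet?, PySem.List.pyIdx?]
  simp only [List.getD_cons_zero, List.getD_cons_succ] at hsI hsJ
  have hd : PySem.Int.mod direction 4 = 0 ∨ PySem.Int.mod direction 4 = 1 ∨
      PySem.Int.mod direction 4 = 2 ∨ PySem.Int.mod direction 4 = 3 := by
    have ha := PySem.Int.mod_nonneg direction (b := 4) (by norm_num)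
    have hb := PySem.Int.mod_lt direction (b := 4) (by norm_num)
    omega
  simp only [Spec_moveUntilBlocked, moveUntilBlocked, moveUntilBlocked_alt, h0, h1]
  clear _hDom hlen hnn h0 h1
  rcases hlI : List.lookup s0 bI with _ | lI <;>
    rcases hlJ : List.lookup s1 bJ with _ | lJ <;>
    rw [hlI] at hsI <;> rw [hlJ] at hsJ <;>
    simp only [Option.getD_some, Option.getD_none] at hsI hsJ <;>
    simp only [hlI, hlJ] <;>
    rcases hd with hd | hd | hd | hd <;>
    simp only [hd] <;>
    (try norm_num) <;>
    (try simp only [PySem.List.sorted_eq_self_of_pairwise _ _ hsI]) <;>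
    (try simp only [PySem.List.sorted_eq_self_of_pairwise _ _ hsJ]) <;>
    (try simp only [eq_self_iff_true, true_and, and_self, if_true, not_true, false_implies]) <;>
    first
      | rfl
      | trivial
      | (rw [pvRevLt _ _ hsJ]; split <;> rename_i hx <;> split at hx <;> simp_all)
      | (rw [pvRevLt _ _ hsI]; split <;> rename_i hx <;> split at hx <;> simp_all)
      | (rw [pvFwdGt _ _ hsJ]; split <;> rename_i hx <;> split at hx <;> simp_all)
      | (rw [pvFwdGt _ _ hsI]; split <;> rename_i hx <;> split at hx <;> simp_all)
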